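-- pv_equiv track=rewrite | github.com/euhidaman/BitGen | src/robot_reasoning_dataset.py | _generate_reasoning_for_task
-- ===== SOURCE A (Python) =====
-- def _generate_reasoning_for_task(task: str, selected_robot: str) -> str:
--     """Generate structured reasoning for robot selection (following deepseek-r1's detailed reasoning style)"""
--     task_lower = task.lower()
--     reasoning_parts = []
--
--     # Task analysis (like deepseek-r1's step-by-step breakdown)
--     reasoning_parts.append(f"Task Analysis: {task}")
--
--     # Environment analysis
--     if 'underwater' in task_lower or 'marine' in task_lower or 'ocean' in task_lower or 'pipes' in task_lower or 'seabed' in task_lower: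
--         reasoning_parts.append("Environment Assessment: Underwater/aquatic environment requires waterproof robot with specialized underwater navigation and marine operation capabilities")
--     elif 'aerial' in task_lower or 'air' in task_lower or 'above' in task_lower or 'high-rise' in task_lower or 'exterior' in task_lower or 'from above' in task_lower:
--         reasoning_parts.append("Environment Assessment: Aerial/elevated environment requires flight capability, aerial maneuvering, and access to hard-to-reach elevated areas")
--     elif 'rough' in task_lower or 'rocky' in task_lower or 'mountain' in task_lower or 'uneven' in task_lower or 'terrain' in task_lower or 'forest' in task_lower:
--         reasoning_parts.append("Environment Assessment: Challenging terrain requires stability, balance, and advanced navigation on irregular, uneven surfaces")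
--     elif 'flat' in task_lower or 'desert' in task_lower or 'warehouse' in task_lower or 'road' in task_lower or 'industrial' in task_lower:
--         reasoning_parts.append("Environment Assessment: Flat/structured environment allows for efficient wheeled movement, stable platforms, and high-speed transport")
--     elif 'indoor' in task_lower or 'building' in task_lower or 'stairs' in task_lower or 'urban' in task_lower or 'pedestrian' in task_lower or 'crowded' in task_lower:
--         reasoning_parts.append("Environment Assessment: Indoor/human environment requires careful navigation, obstacle avoidance, and potential human interaction capabilities")
--
--     # Capability requirements analysis
--     capability_requirements = []
--     if 'inspect' in task_lower or 'survey' in task_lower or 'monitor' in task_lower or 'check' in task_lower or 'assess' in task_lower: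
--         capability_requirements.append("inspection and surveillance systems")
--     if 'deliver' in task_lower or 'transport' in task_lower or 'carry' in task_lower or 'supplies' in task_lower or 'package' in task_lower:
--         capability_requirements.append("payload capacity and reliable transport mechanisms")
--     if 'explore' in task_lower or 'navigate' in task_lower or 'traverse' in task_lower or 'map' in task_lower:
--         capability_requirements.append("autonomous navigation and exploration capabilities")
--     if 'interaction' in task_lower or 'human' in task_lower or 'pedestrian' in task_lower:
--         capability_requirements.append("safe human interaction and social navigation")
--
--     if capability_requirements:
--         reasoning_parts.append(f"Required Capabilities: {', '.join(capability_requirements)}")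
--
--     # Robot-specific evaluation and justification
--     robot_justifications = {
--         'Drone': "Drone is optimal for aerial operations with advanced surveillance capabilities, lightweight transport, and ability to access hard-to-reach elevated areas safely and efficiently",
--         'Underwater Robot': "Underwater Robot is specialized for aquatic environments with waterproof design, underwater navigation systems, deep sea exploration, and marine inspection capabilities",
--         'Humanoid': "Humanoid robot excels in human environments with advanced manipulation capabilities, complex task execution, human interaction skills, and versatile tool use",
--         'Robot with Wheels': "Robot with Wheels provides fast and efficient movement on flat surfaces with excellent payload capacity, stable platform design, and energy-efficient transport",
--         'Robot with Legs': "Robot with Legs offers superior stability and navigation on rough, uneven terrain with good load-carrying ability, balance systems, and versatile mobility"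
--     }
--
--     # Handle multiple robots (for cases like "Humanoid, Robot with Legs")
--     if ',' in selected_robot:
--         robots = [r.strip() for r in selected_robot.split(',')]
--         reasoning_parts.append("Multiple Robot Selection Analysis:")
--         reasoning_parts.append("Task complexity requires multiple specialized robots working in coordination:")
--         for robot in robots:
--             if robot in robot_justifications:
--                 reasoning_parts.append(f"• {robot}: {robot_justifications[robot]}")
--         reasoning_parts.append(f"Coordination Strategy: {', '.join(robots)} working together provides complementary capabilities for optimal task completion")
--     else:
--         reasoning_parts.append("Robot Selection Rationale:")
--         if selected_robot in robot_justifications: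
--             reasoning_parts.append(robot_justifications[selected_robot])
--
--     # Final conclusion (like deepseek-r1's conclusive reasoning)
--     reasoning_parts.append(f"Conclusion: {selected_robot} is the optimal choice for this specific task based on environmental requirements and capability matching")
--
--     return "\n".join(reasoning_parts)
-- ===== SOURCE B (Python) =====
-- # Different algorithm: one text-driven scan collects all matched keywords into a set
-- # (instead of per-keyword `in` containment tests); decisions are then set-membership lookups.
--
-- _ENV_TABLE = [
--     (['underwater', 'marine', 'ocean', 'pipes', 'seabed'],
--      "Environment Assessment: Underwater/aquatic environment requires waterproof robot with specialized underwater navigation and marine operation capabilities"),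
--     (['aerial', 'air', 'above', 'high-rise', 'exterior', 'from above'],
--      "Environment Assessment: Aerial/elevated environment requires flight capability, aerial maneuvering, and access to hard-to-reach elevated areas"),
--     (['rough', 'rocky', 'mountain', 'uneven', 'terrain', 'forest'],
--      "Environment Assessment: Challenging terrain requires stability, balance, and advanced navigation on irregular, uneven surfaces"),
--     (['flat', 'desert', 'warehouse', 'road', 'industrial'],
--      "Environment Assessment: Flat/structured environment allows for efficient wheeled movement, stable platforms, and high-speed transport"),
--     (['indoor', 'building', 'stairs', 'urban', 'pedestrian', 'crowded'],
--      "Environment Assessment: Indoor/human environment requires careful navigation, obstacle avoidance, and potential human interaction capabilities"),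
-- ]
--
-- _CAP_TABLE = [
--     (['inspect', 'survey', 'monitor', 'check', 'assess'],
--      "inspection and surveillance systems"),
--     (['deliver', 'transport', 'carry', 'supplies', 'package'],
--      "payload capacity and reliable transport mechanisms"),
--     (['explore', 'navigate', 'traverse', 'map'],
--      "autonomous navigation and exploration capabilities"),
--     (['interaction', 'human', 'pedestrian'],
--      "safe human interaction and social navigation"),
-- ]
--
-- _KEYWORDS = [k for keys, _ in _ENV_TABLE + _CAP_TABLE for k in keys]
--
-- _JUSTIFICATIONS = {
--     'Drone': "Drone is optimal for aerial operations with advanced surveillance capabilities, lightweight transport, and ability to access hard-to-reach elevated areas safely and efficiently",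
--     'Underwater Robot': "Underwater Robot is specialized for aquatic environments with waterproof design, underwater navigation systems, deep sea exploration, and marine inspection capabilities",
--     'Humanoid': "Humanoid robot excels in human environments with advanced manipulation capabilities, complex task execution, human interaction skills, and versatile tool use",
--     'Robot with Wheels': "Robot with Wheels provides fast and efficient movement on flat surfaces with excellent payload capacity, stable platform design, and energy-efficient transport",
--     'Robot with Legs': "Robot with Legs offers superior stability and navigation on rough, uneven terrain with good load-carrying ability, balance systems, and versatile mobility"
-- }
--
--
-- def _generate_reasoning_for_task(task: str, selected_robot: str) -> str:
--     tl = task.lower()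
--     # Single scan of the text: at each position record every keyword starting there.
--     hits = set()
--     for i in range(len(tl) + 1):
--         for k in _KEYWORDS:
--             if tl.startswith(k, i):
--                 hits.add(k)
--     env = next((msg for keys, msg in _ENV_TABLE if any(k in hits for k in keys)), None)
--     caps = [cap for keys, cap in _CAP_TABLE if any(k in hits for k in keys)]
--     if ',' in selected_robot:
--         robots = [r.strip() for r in selected_robot.split(',')]
--         robot_section = (
--             ["Multiple Robot Selection Analysis:",
--              "Task complexity requires multiple specialized robots working in coordination:"]
--             + [f"• {r}: {_JUSTIFICATIONS[r]}" for r in robots if r in _JUSTIFICATIONS]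
--             + [f"Coordination Strategy: {', '.join(robots)} working together provides complementary capabilities for optimal task completion"]
--         )
--     else:
--         robot_section = (["Robot Selection Rationale:"]
--                          + ([_JUSTIFICATIONS[selected_robot]] if selected_robot in _JUSTIFICATIONS else []))
--     parts = ([f"Task Analysis: {task}"]
--              + ([env] if env is not None else [])
--              + ([f"Required Capabilities: {', '.join(caps)}"] if caps else [])
--              + robot_section
--              + [f"Conclusion: {selected_robot} is the optimal choice for this specific task based on environmental requirements and capability matching"])
--     return "\n".join(parts)
-- ===== Notes on version B (the rewrite author's own statement) =====
-- stated objective: alternative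
-- what changed: Replaced A's per-keyword substring containment tests (each keyword searched in the text with 'in') by a single left-to-right scan of the lowered task text that collects every keyword starting at each position into a set; the environment (first matching row) and capability (all matching rows) decisions are then pure set-membership lookups over data tables instead of if/elif and independent if branches.
import Mathlib
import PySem

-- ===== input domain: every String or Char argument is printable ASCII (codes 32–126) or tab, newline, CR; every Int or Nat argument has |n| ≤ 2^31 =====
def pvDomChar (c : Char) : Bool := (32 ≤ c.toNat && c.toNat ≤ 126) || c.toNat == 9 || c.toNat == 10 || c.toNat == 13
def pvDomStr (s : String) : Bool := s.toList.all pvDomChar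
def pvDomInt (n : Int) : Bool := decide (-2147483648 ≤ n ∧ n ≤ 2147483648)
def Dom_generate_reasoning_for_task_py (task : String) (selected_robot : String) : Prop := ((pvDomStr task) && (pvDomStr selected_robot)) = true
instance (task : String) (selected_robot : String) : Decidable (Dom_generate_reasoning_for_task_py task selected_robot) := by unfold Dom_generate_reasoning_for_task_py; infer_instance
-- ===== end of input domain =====

-- B replaces A's per-keyword substring containment tests by a single left-to-right scan of the
-- task text collecting every matched keyword into a set; decisions are then set-membership
-- lookups over data tables (objective: alternative algorithm, same cost).

-- ===== PORT A =====
-- A's local robot_justifications dict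
def pvAJust : PySem.Dict String String := PySem.Dict.ofList [
  ("Drone", "Drone is optimal for aerial operations with advanced surveillance capabilities, lightweight transport, and ability to access hard-to-reach elevated areas safely and efficiently"),
  ("Underwater Robot", "Underwater Robot is specialized for aquatic environments with waterproof design, underwater navigation systems, deep sea exploration, and marine inspection capabilities"),
  ("Humanoid", "Humanoid robot excels in human environments with advanced manipulation capabilities, complex task execution, human interaction skills, and versatile tool use"),
  ("Robot with Wheels", "Robot with Wheels provides fast and efficient movement on flat surfaces with excellent payload capacity, stable platform design, and energy-efficient transport"),
  ("Robot with Legs", "Robot with Legs offers superior stability and navigation on rough, uneven terrain with good load-carrying ability, balance systems, and versatile mobility")]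

def generate_reasoning_for_task_py (task : String) (selected_robot : String) : String :=
  let tl := PySem.Str.lower task
  let parts : List String := []
  let parts := parts ++ ["Task Analysis: " ++ task]
  let parts :=
    if PySem.Str.isIn "underwater" tl || PySem.Str.isIn "marine" tl || PySem.Str.isIn "ocean" tl || PySem.Str.isIn "pipes" tl || PySem.Str.isIn "seabed" tl then
      parts ++ ["Environment Assessment: Underwater/aquatic environment requires waterproof robot with specialized underwater navigation and marine operation capabilities"]
    else if PySem.Str.isIn "aerial" tl || PySem.Str.isIn "air" tl || PySem.Str.isIn "above" tl || PySem.Str.isIn "high-rise" tl || PySem.Str.isIn "exterior" tl || PySem.Str.isIn "from above" tl then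
      parts ++ ["Environment Assessment: Aerial/elevated environment requires flight capability, aerial maneuvering, and access to hard-to-reach elevated areas"]
    else if PySem.Str.isIn "rough" tl || PySem.Str.isIn "rocky" tl || PySem.Str.isIn "mountain" tl || PySem.Str.isIn "uneven" tl || PySem.Str.isIn "terrain" tl || PySem.Str.isIn "forest" tl then
      parts ++ ["Environment Assessment: Challenging terrain requires stability, balance, and advanced navigation on irregular, uneven surfaces"]
    else if PySem.Str.isIn "flat" tl || PySem.Str.isIn "desert" tl || PySem.Str.isIn "warehouse" tl || PySem.Str.isIn "road" tl || PySem.Str.isIn "industrial" tl then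
      parts ++ ["Environment Assessment: Flat/structured environment allows for efficient wheeled movement, stable platforms, and high-speed transport"]
    else if PySem.Str.isIn "indoor" tl || PySem.Str.isIn "building" tl || PySem.Str.isIn "stairs" tl || PySem.Str.isIn "urban" tl || PySem.Str.isIn "pedestrian" tl || PySem.Str.isIn "crowded" tl then
      parts ++ ["Environment Assessment: Indoor/human environment requires careful navigation, obstacle avoidance, and potential human interaction capabilities"]
    else parts
  let caps : List String := []
  let caps :=
    if PySem.Str.isIn "inspect" tl || PySem.Str.isIn "survey" tl || PySem.Str.isIn "monitor" tl || PySem.Str.isIn "check" tl || PySem.Str.isIn "assess" tl then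
      caps ++ ["inspection and surveillance systems"] else caps
  let caps :=
    if PySem.Str.isIn "deliver" tl || PySem.Str.isIn "transport" tl || PySem.Str.isIn "carry" tl || PySem.Str.isIn "supplies" tl || PySem.Str.isIn "package" tl then
      caps ++ ["payload capacity and reliable transport mechanisms"] else caps
  let caps :=
    if PySem.Str.isIn "explore" tl || PySem.Str.isIn "navigate" tl || PySem.Str.isIn "traverse" tl || PySem.Str.isIn "map" tl then
      caps ++ ["autonomous navigation and exploration capabilities"] else caps
  let caps :=
    if PySem.Str.isIn "interaction" tl || PySem.Str.isIn "human" tl || PySem.Str.isIn "pedestrian" tl then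
      caps ++ ["safe human interaction and social navigation"] else caps
  let parts := if caps.isEmpty then parts else parts ++ ["Required Capabilities: " ++ PySem.Str.join ", " caps]
  let parts :=
    if PySem.Str.isIn "," selected_robot then
      let robots := ((PySem.Str.split? selected_robot ",").getD []).map PySem.Str.strip
      let parts := parts ++ ["Multiple Robot Selection Analysis:"]
      let parts := parts ++ ["Task complexity requires multiple specialized robots working in coordination:"]
      let parts := robots.foldl (fun acc robot =>
        if pvAJust.contains robot then acc ++ ["• " ++ robot ++ ": " ++ pvAJust.getD robot ""] else acc) parts
      parts ++ ["Coordination Strategy: " ++ PySem.Str.join ", " robots ++ " working together provides complementary capabilities for optimal task completion"]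
    else
      let parts := parts ++ ["Robot Selection Rationale:"]
      if pvAJust.contains selected_robot then parts ++ [pvAJust.getD selected_robot ""] else parts
  let parts := parts ++ ["Conclusion: " ++ selected_robot ++ " is the optimal choice for this specific task based on environmental requirements and capability matching"]
  PySem.Str.join "\n" parts

-- ===== PORT B =====
def pvEnvTable : List (List String × String) := [
  (["underwater", "marine", "ocean", "pipes", "seabed"],
   "Environment Assessment: Underwater/aquatic environment requires waterproof robot with specialized underwater navigation and marine operation capabilities"),
  (["aerial", "air", "above", "high-rise", "exterior", "from above"],
   "Environment Assessment: Aerial/elevated environment requires flight capability, aerial maneuvering, and access to hard-to-reach elevated areas"),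
  (["rough", "rocky", "mountain", "uneven", "terrain", "forest"],
   "Environment Assessment: Challenging terrain requires stability, balance, and advanced navigation on irregular, uneven surfaces"),
  (["flat", "desert", "warehouse", "road", "industrial"],
   "Environment Assessment: Flat/structured environment allows for efficient wheeled movement, stable platforms, and high-speed transport"),
  (["indoor", "building", "stairs", "urban", "pedestrian", "crowded"],
   "Environment Assessment: Indoor/human environment requires careful navigation, obstacle avoidance, and potential human interaction capabilities")]

def pvCapTable : List (List String × String) := [
  (["inspect", "survey", "monitor", "check", "assess"], "inspection and surveillance systems"),
  (["deliver", "transport", "carry", "supplies", "package"], "payload capacity and reliable transport mechanisms"),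
  (["explore", "navigate", "traverse", "map"], "autonomous navigation and exploration capabilities"),
  (["interaction", "human", "pedestrian"], "safe human interaction and social navigation")]

-- _KEYWORDS = [k for keys, _ in _ENV_TABLE + _CAP_TABLE for k in keys]
def pvKeywords : List String := (pvEnvTable ++ pvCapTable).flatMap Prod.fst

def pvBJust : PySem.Dict String String := PySem.Dict.ofList [
  ("Drone", "Drone is optimal for aerial operations with advanced surveillance capabilities, lightweight transport, and ability to access hard-to-reach elevated areas safely and efficiently"),
  ("Underwater Robot", "Underwater Robot is specialized for aquatic environments with waterproof design, underwater navigation systems, deep sea exploration, and marine inspection capabilities"),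
  ("Humanoid", "Humanoid robot excels in human environments with advanced manipulation capabilities, complex task execution, human interaction skills, and versatile tool use"),
  ("Robot with Wheels", "Robot with Wheels provides fast and efficient movement on flat surfaces with excellent payload capacity, stable platform design, and energy-efficient transport"),
  ("Robot with Legs", "Robot with Legs offers superior stability and navigation on rough, uneven terrain with good load-carrying ability, balance systems, and versatile mobility")]

-- the scan 'for i in range(len(tl)+1): for k in _KEYWORDS: if tl.startswith(k, i): hits.add(k)'
-- transcribed as structural recursion over the suffixes of the text (tl.startswith(k, i) is exact
-- as 'k.toList.isPrefixOf (suffix at i)' for these non-empty ASCII keywords)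
def pvScanHits (keys : List String) (suf : List Char) (acc : PySem.Set String) : PySem.Set String :=
  let acc' := keys.foldl (fun a k => if k.toList.isPrefixOf suf then PySem.Set.add a k else a) acc
  match suf with
  | [] => acc'
  | _ :: rest => pvScanHits keys rest acc'

def generate_reasoning_for_task_py_alt (task : String) (selected_robot : String) : String :=
  let tl := PySem.Str.lower task
  let hits : PySem.Set String := pvScanHits pvKeywords tl.toList PySem.Set.empty
  let env : Option String := (pvEnvTable.find? (fun p => p.1.any (fun k => PySem.Set.contains hits k))).map Prod.snd
  let caps : List String := (pvCapTable.filter (fun p => p.1.any (fun k => PySem.Set.contains hits k))).map Prod.snd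
  let robotSection : List String :=
    if PySem.Str.isIn "," selected_robot then
      let robots := ((PySem.Str.split? selected_robot ",").getD []).map PySem.Str.strip
      ["Multiple Robot Selection Analysis:",
       "Task complexity requires multiple specialized robots working in coordination:"]
      ++ robots.filterMap (fun r => if pvBJust.contains r then some ("• " ++ r ++ ": " ++ pvBJust.getD r "") else none)
      ++ ["Coordination Strategy: " ++ PySem.Str.join ", " robots ++ " working together provides complementary capabilities for optimal task completion"]
    else
      ["Robot Selection Rationale:"] ++ (if pvBJust.contains selected_robot then [pvBJust.getD selected_robot ""] else [])
  let parts := ["Task Analysis: " ++ task]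
    ++ env.toList
    ++ (if caps.isEmpty then [] else ["Required Capabilities: " ++ PySem.Str.join ", " caps])
    ++ robotSection
    ++ ["Conclusion: " ++ selected_robot ++ " is the optimal choice for this specific task based on environmental requirements and capability matching"]
  PySem.Str.join "\n" parts

-- ===== PRECONDITION & SPEC =====
def Spec_generate_reasoning_for_task_py (task : String) (selected_robot : String) (out : String) : Prop := out = generate_reasoning_for_task_py_alt task selected_robot
instance (task : String) (selected_robot : String) (out : String) : Decidable (Spec_generate_reasoning_for_task_py task selected_robot out) := by unfold Spec_generate_reasoning_for_task_py; infer_instance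

-- ===== CLAIM (what is proved, stated in full; the proofs are below) =====
def Claim_equal_generate_reasoning_for_task_py : Prop := ∀ (task : String) (selected_robot : String), Dom_generate_reasoning_for_task_py task selected_robot → Spec_generate_reasoning_for_task_py task selected_robot (generate_reasoning_for_task_py task selected_robot)

-- ===== LEMMAS AND PROOFS =====
theorem pv_filterMap_if {α β : Type} (l : List α) (c : α → Bool) (f : α → β) :
    l.filterMap (fun r => if c r then some (f r) else none) = (l.filter c).map f := by
  induction l with
  | nil => rfl
  | cons x xs ih => by_cases h : c x <;> simp [h, ih]

theorem pv_foldl_append_if {α β : Type} (l : List α) (c : α → Bool) (f : α → β) (acc : List β) :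
    l.foldl (fun acc r => if c r then acc ++ [f r] else acc) acc = acc ++ (l.filter c).map f := by
  induction l generalizing acc with
  | nil => simp
  | cons x xs ih => by_cases h : c x <;> simp [h, ih]

theorem pv_find?_cons {α : Type} (p : α → Bool) (x : α) (l : List α) :
    List.find? p (x :: l) = if p x then some x else List.find? p l := by
  by_cases h : p x <;> simp [h]

theorem pvBJust_eq_pvAJust : pvBJust = pvAJust := rfl

theorem pv_mem_foldl_add (keys : List String) (suf : List Char) (acc : List String) (k : String) :
    k ∈ keys.foldl (fun a k' => if k'.toList.isPrefixOf suf then PySem.Set.add a k' else a) acc ↔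
      k ∈ acc ∨ (k ∈ keys ∧ k.toList.isPrefixOf suf = true) := by
  induction keys generalizing acc with
  | nil => simp
  | cons x xs ih =>
      simp only [List.foldl_cons, ih, List.mem_cons]
      by_cases h : x.toList.isPrefixOf suf = true
      · rw [if_pos h]
        simp only [PySem.Set.mem_add]
        constructor
        · rintro ((hk | rfl) | ⟨hk, hp⟩)
          · exact Or.inl hk
          · exact Or.inr ⟨Or.inl rfl, h⟩
          · exact Or.inr ⟨Or.inr hk, hp⟩
        · rintro (hk | ⟨(rfl | hk), hp⟩)
          · exact Or.inl (Or.inl hk)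
          · exact Or.inl (Or.inr rfl)
          · exact Or.inr ⟨hk, hp⟩
      · rw [if_neg h]
        constructor
        · rintro (hk | ⟨hk, hp⟩)
          · exact Or.inl hk
          · exact Or.inr ⟨Or.inr hk, hp⟩
        · rintro (hk | ⟨(rfl | hk), hp⟩)
          · exact Or.inl hk
          · exact absurd hp h
          · exact Or.inr ⟨hk, hp⟩

theorem pv_mem_scan (keys : List String) (suf : List Char) (acc : List String) (k : String) :
    k ∈ pvScanHits keys suf acc ↔
      k ∈ acc ∨ (k ∈ keys ∧ ∃ j, k.toList <+: suf.drop j) := by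
  induction suf generalizing acc with
  | nil =>
      simp only [pvScanHits]
      rw [pv_mem_foldl_add]
      simp [List.isPrefixOf_iff_prefix]
  | cons c rest ih =>
      simp only [pvScanHits]
      rw [ih, pv_mem_foldl_add]
      simp only [List.isPrefixOf_iff_prefix]
      constructor
      · rintro (((h | ⟨hk, hp⟩) | ⟨hk, j, hp⟩))
        · exact Or.inl h
        · exact Or.inr ⟨hk, 0, by simpa using hp⟩
        · exact Or.inr ⟨hk, j + 1, by simpa using hp⟩
      · rintro (h | ⟨hk, j, hp⟩)
        · exact Or.inl (Or.inl h)
        · cases j with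
          | zero => exact Or.inl (Or.inr ⟨hk, by simpa using hp⟩)
          | succ j => exact Or.inr ⟨hk, j, by simpa using hp⟩

theorem pv_contains_scan (keys : List String) (suf : List Char) (k : String) :
    PySem.Set.contains (pvScanHits keys suf PySem.Set.empty) k =
      (keys.contains k && PySem.Chars.isIn k.toList suf) := by
  rw [Bool.eq_iff_iff]
  simp [PySem.Set.contains, PySem.Set.empty, pv_mem_scan,
    ← PySem.Chars.exists_prefix_drop_iff_isIn]

theorem pv_caps (c5 c6 c7 c8 : Bool) (m5 m6 m7 m8 : String) :
    (if c5 = true then m5 :: (if c6 = true then m6 :: (if c7 = true then m7 :: (if c8 = true then [m8] else ([] : List String)) else (if c8 = true then [m8] else ([] : List String))) else (if c7 = true then m7 :: (if c8 = true then [m8] else ([] : List String)) else (if c8 = true then [m8] else ([] : List String)))) else (if c6 = true then m6 :: (if c7 = true then m7 :: (if c8 = true then [m8] else ([] : List String)) else (if c8 = true then [m8] else ([] : List String))) else (if c7 = true then m7 :: (if c8 = true then [m8] else ([] : List String)) else (if c8 = true then [m8] else ([] : List String))))) = (if c8 = true then (if c7 = true then (if c6 = true then (if c5 = true then [m5] else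 ([] : List String)) ++ [m6] else (if c5 = true then [m5] else ([] : List String))) ++ [m7] else (if c6 = true then (if c5 = true then [m5] else ([] : List String)) ++ [m6] else (if c5 = true then [m5] else ([] : List String)))) ++ [m8] else (if c7 = true then (if c6 = true then (if c5 = true then [m5] else ([] : List String)) ++ [m6] else (if c5 = true then [m5] else ([] : List String))) ++ [m7] else (if c6 = true then (if c5 = true then [m5] else ([] : List String)) ++ [m6] else (if c5 = true then [m5] else ([] : List String))))) := by
  split_ifs <;> rfl

-- ===== VERDICT (by name: the statement is the Claim_ definition above) =====
set_option maxHeartbeats 1000000 in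
theorem generate_reasoning_for_task_py_spec : Claim_equal_generate_reasoning_for_task_py := by
  intro task selected_robot _
  unfold Spec_generate_reasoning_for_task_py generate_reasoning_for_task_py generate_reasoning_for_task_py_alt
  simp only [pvEnvTable, pvCapTable, pvBJust_eq_pvAJust, pv_foldl_append_if, pv_filterMap_if,
    List.any_cons, List.any_nil, Bool.or_false, Bool.or_assoc,
    List.filter_cons, List.filter_nil, pv_find?_cons, List.find?_nil, List.nil_append,
    apply_ite (List.map (@Prod.snd (List String) String)), apply_ite (@Option.toList String),
    apply_ite (Option.map (@Prod.snd (List String) String)),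
    Option.map_some, Option.map_none, Option.toList_some, Option.toList_none,
    List.map_cons, List.map_nil,
    pv_contains_scan, PySem.Str.isIn_eq, Bool.true_and,
    show pvKeywords.contains "underwater" = true from by decide,
    show pvKeywords.contains "marine" = true from by decide,
    show pvKeywords.contains "ocean" = true from by decide,
    show pvKeywords.contains "pipes" = true from by decide,
    show pvKeywords.contains "seabed" = true from by decide,
    show pvKeywords.contains "aerial" = true from by decide,
    show pvKeywords.contains "air" = true from by decide,
    show pvKeywords.contains "above" = true from by decide,
    show pvKeywords.contains "high-rise" = true from by decide,
    show pvKeywords.contains "exterior" = true from by decide,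
    show pvKeywords.contains "from above" = true from by decide,
    show pvKeywords.contains "rough" = true from by decide,
    show pvKeywords.contains "rocky" = true from by decide,
    show pvKeywords.contains "mountain" = true from by decide,
    show pvKeywords.contains "uneven" = true from by decide,
    show pvKeywords.contains "terrain" = true from by decide,
    show pvKeywords.contains "forest" = true from by decide,
    show pvKeywords.contains "flat" = true from by decide,
    show pvKeywords.contains "desert" = true from by decide,
    show pvKeywords.contains "warehouse" = true from by decide,
    show pvKeywords.contains "road" = true from by decide,
    show pvKeywords.contains "industrial" = true from by decide,
    show pvKeywords.contains "indoor" = true from by decide,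
    show pvKeywords.contains "building" = true from by decide,
    show pvKeywords.contains "stairs" = true from by decide,
    show pvKeywords.contains "urban" = true from by decide,
    show pvKeywords.contains "pedestrian" = true from by decide,
    show pvKeywords.contains "crowded" = true from by decide,
    show pvKeywords.contains "inspect" = true from by decide,
    show pvKeywords.contains "survey" = true from by decide,
    show pvKeywords.contains "monitor" = true from by decide,
    show pvKeywords.contains "check" = true from by decide,
    show pvKeywords.contains "assess" = true from by decide,
    show pvKeywords.contains "deliver" = true from by decide,
    show pvKeywords.contains "transport" = true from by decide,
    show pvKeywords.contains "carry" = true from by decide,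
    show pvKeywords.contains "supplies" = true from by decide,
    show pvKeywords.contains "package" = true from by decide,
    show pvKeywords.contains "explore" = true from by decide,
    show pvKeywords.contains "navigate" = true from by decide,
    show pvKeywords.contains "traverse" = true from by decide,
    show pvKeywords.contains "map" = true from by decide,
    show pvKeywords.contains "interaction" = true from by decide,
    show pvKeywords.contains "human" = true from by decide]
  generalize (PySem.Chars.isIn "underwater".toList (PySem.Str.lower task).toList || (PySem.Chars.isIn "marine".toList (PySem.Str.lower task).toList || (PySem.Chars.isIn "ocean".toList (PySem.Str.lower task).toList || (PySem.Chars.isIn "pipes".toList (PySem.Str.lower task).toList || PySem.Chars.isIn "seabed".toList (PySem.Str.lower task).toList)))) = c0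
  generalize (PySem.Chars.isIn "aerial".toList (PySem.Str.lower task).toList || (PySem.Chars.isIn "air".toList (PySem.Str.lower task).toList || (PySem.Chars.isIn "above".toList (PySem.Str.lower task).toList || (PySem.Chars.isIn "high-rise".toList (PySem.Str.lower task).toList || (PySem.Chars.isIn "exterior".toList (PySem.Str.lower task).toList || PySem.Chars.isIn "from above".toList (PySem.Str.lower task).toList))))) = c1
  generalize (PySem.Chars.isIn "rough".toList (PySem.Str.lower task).toList || (PySem.Chars.isIn "rocky".toList (PySem.Str.lower task).toList || (PySem.Chars.isIn "mountain".toList (PySem.Str.lower task).toList || (PySem.Chars.isIn "uneven".toList (PySem.Str.lower task).toList || (PySem.Chars.isIn "terrain".toList (PySem.Str.lower task).toList || PySem.Chars.isIn "forest".toList (PySem.Str.lower task).toList))))) = c2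
  generalize (PySem.Chars.isIn "flat".toList (PySem.Str.lower task).toList || (PySem.Chars.isIn "desert".toList (PySem.Str.lower task).toList || (PySem.Chars.isIn "warehouse".toList (PySem.Str.lower task).toList || (PySem.Chars.isIn "road".toList (PySem.Str.lower task).toList || PySem.Chars.isIn "industrial".toList (PySem.Str.lower task).toList)))) = c3
  generalize (PySem.Chars.isIn "indoor".toList (PySem.Str.lower task).toList || (PySem.Chars.isIn "building".toList (PySem.Str.lower task).toList || (PySem.Chars.isIn "stairs".toList (PySem.Str.lower task).toList || (PySem.Chars.isIn "urban".toList (PySem.Str.lower task).toList || (PySem.Chars.isIn "pedestrian".toList (PySem.Str.lower task).toList || PySem.Chars.isIn "crowded".toList (PySem.Str.lower task).toList))))) = c4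
  generalize (PySem.Chars.isIn "inspect".toList (PySem.Str.lower task).toList || (PySem.Chars.isIn "survey".toList (PySem.Str.lower task).toList || (PySem.Chars.isIn "monitor".toList (PySem.Str.lower task).toList || (PySem.Chars.isIn "check".toList (PySem.Str.lower task).toList || PySem.Chars.isIn "assess".toList (PySem.Str.lower task).toList)))) = c5
  generalize (PySem.Chars.isIn "deliver".toList (PySem.Str.lower task).toList || (PySem.Chars.isIn "transport".toList (PySem.Str.lower task).toList || (PySem.Chars.isIn "carry".toList (PySem.Str.lower task).toList || (PySem.Chars.isIn "supplies".toList (PySem.Str.lower task).toList || PySem.Chars.isIn "package".toList (PySem.Str.lower task).toList)))) = c6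
  generalize (PySem.Chars.isIn "explore".toList (PySem.Str.lower task).toList || (PySem.Chars.isIn "navigate".toList (PySem.Str.lower task).toList || (PySem.Chars.isIn "traverse".toList (PySem.Str.lower task).toList || PySem.Chars.isIn "map".toList (PySem.Str.lower task).toList))) = c7
  generalize (PySem.Chars.isIn "interaction".toList (PySem.Str.lower task).toList || (PySem.Chars.isIn "human".toList (PySem.Str.lower task).toList || PySem.Chars.isIn "pedestrian".toList (PySem.Str.lower task).toList)) = c8
  generalize ("Environment Assessment: Underwater/aquatic environment requires waterproof robot with specialized underwater navigation and marine operation capabilities" : String) = m0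
  generalize ("Environment Assessment: Aerial/elevated environment requires flight capability, aerial maneuvering, and access to hard-to-reach elevated areas" : String) = m1
  generalize ("Environment Assessment: Challenging terrain requires stability, balance, and advanced navigation on irregular, uneven surfaces" : String) = m2
  generalize ("Environment Assessment: Flat/structured environment allows for efficient wheeled movement, stable platforms, and high-speed transport" : String) = m3
  generalize ("Environment Assessment: Indoor/human environment requires careful navigation, obstacle avoidance, and potential human interaction capabilities" : String) = m4
  generalize ("inspection and surveillance systems" : String) = m5
  generalize ("payload capacity and reliable transport mechanisms" : String) = m6
  generalize ("autonomous navigation and exploration capabilities" : String) = m7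
  generalize ("safe human interaction and social navigation" : String) = m8
  rw [pv_caps]
  generalize (if c8 = true then (if c7 = true then (if c6 = true then (if c5 = true then [m5] else ([] : List String)) ++ [m6] else (if c5 = true then [m5] else ([] : List String))) ++ [m7] else (if c6 = true then (if c5 = true then [m5] else ([] : List String)) ++ [m6] else (if c5 = true then [m5] else ([] : List String)))) ++ [m8] else (if c7 = true then (if c6 = true then (if c5 = true then [m5] else ([] : List String)) ++ [m6] else (if c5 = true then [m5] else ([] : List String))) ++ [m7] else (if c6 = true then (if c5 = true then [m5] else ([] : List String)) ++ [m6] else (if c5 = true then [m5] else ([] : List String))))) = caps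
  split_ifs <;> rfl
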